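-- pv_equiv track=rewrite | github.com/MinKyeom/KMK-DREAM | Programmers/Lv1/대충 만든 자판.py | solution
-- ===== SOURCE A (Python) =====
-- def solution(keymap, targets):
--     result = []
--     for x in targets:
--         count = 0
--         k = list(x)
--         for y in range(len(k)):
--             sub = []
--             check = []
--             for z in keymap:
--                 f = z.find(k[y])
--                 if f == -1:
--                     continue
--                 sub.append(f + 1)
--             if len(sub) == 0:
--                 result.append(-1)
--                 check.append(-1)
--                 break
--             else:
--                 count += min(sub)
--         if count != 0 and -1 not in check:
--             result.append(count)
--         check = []
--
--     return result
-- ===== SOURCE B (Python) =====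
-- def solution(keymap, targets):
--     # memoize per distinct target char: min over keymap of first-occurrence index + 1 (-1 if absent)
--     best = {}
--     for t in targets:
--         for ch in t:
--             if ch not in best:
--                 m = -1
--                 for z in keymap:
--                     f = z.find(ch)
--                     if f != -1 and (m == -1 or f + 1 < m):
--                         m = f + 1
--                 best[ch] = m
--     result = []
--     for t in targets:
--         if t:  # A emits no entry for an empty target; behaviour preserved
--             total = 0
--             for ch in t:
--                 b = best.get(ch, -1)
--                 if b == -1:
--                     total = -1
--                     break
--                 total += b
--             result.append(total)
--     return result
-- ===== Notes on version B (the rewrite author's own statement) =====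
-- stated objective: faster
-- what changed: B builds a memo dict mapping each distinct target character to its minimal key-press count (min over keymap of first-occurrence index + 1) once, then answers each target by a single summing pass, instead of A's rescan of the whole keymap for every character of every target; like A it emits no entry for an empty target string.
import Mathlib
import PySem

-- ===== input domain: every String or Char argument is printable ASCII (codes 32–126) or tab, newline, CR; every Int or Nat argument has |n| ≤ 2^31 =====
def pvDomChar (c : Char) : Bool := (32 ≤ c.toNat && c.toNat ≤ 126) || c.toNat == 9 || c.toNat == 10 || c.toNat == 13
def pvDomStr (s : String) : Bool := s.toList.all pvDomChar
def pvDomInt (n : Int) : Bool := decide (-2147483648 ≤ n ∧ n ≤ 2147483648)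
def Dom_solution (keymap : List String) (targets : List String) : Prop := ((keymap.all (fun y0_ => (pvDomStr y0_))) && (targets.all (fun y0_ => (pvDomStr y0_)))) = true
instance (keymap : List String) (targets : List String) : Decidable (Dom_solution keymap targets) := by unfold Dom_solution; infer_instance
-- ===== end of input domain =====

-- B memoizes each distinct target character's minimal key-press count in a dict built once,
-- replacing A's rescan of the whole keymap for every character of every target (objective: faster).

-- ===== PORT A =====
-- inner 'for z in keymap' loop: collect f+1 for every keymap string containing c
def solSub (keymap : List String) (c : Char) : List Int :=
  keymap.foldl (fun sub z =>
    let f := PySem.Str.find z (String.mk [c])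
    if f = -1 then sub else sub ++ [f + 1]) []

-- 'for y in range(len(k))' loop with its break: returns (broke, count)
def solInner (keymap : List String) : List Char → Int → Bool × Int
  | [], count => (false, count)
  | c :: rest, count =>
    let sub := solSub keymap c
    if sub.length = 0 then (true, count)
    else solInner keymap rest (count + (PySem.List.min? sub (fun v => v)).getD 0)

def solution (keymap : List String) (targets : List String) : List Int :=
  targets.foldl (fun result x =>
    let r := solInner keymap x.toList 0
    if r.1 then result ++ [-1]            -- break path: -1 was appended, check = [-1]
    else if r.2 ≠ 0 then result ++ [r.2]  -- 'if count != 0 and -1 not in check'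
    else result) []

-- ===== PORT B =====
-- running min over keymap of first-occurrence index + 1 (-1 if the char occurs nowhere)
def altBest (keymap : List String) (c : Char) : Int :=
  keymap.foldl (fun m z =>
    let f := PySem.Str.find z (String.mk [c])
    if f ≠ -1 ∧ (m = -1 ∨ f + 1 < m) then f + 1 else m) (-1)

-- memo dict over the distinct characters of the targets
def altDict (keymap : List String) (targets : List String) : PySem.Dict Char Int :=
  targets.foldl (fun d t =>
    t.toList.foldl (fun d ch =>
      if d.contains ch then d else d.insert ch (altBest keymap ch)) d) PySem.Dict.empty

-- per-target summing loop with its break ('total = -1; break')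
def altSum (best : PySem.Dict Char Int) : List Char → Int → Int
  | [], total => total
  | ch :: rest, total =>
    let b := best.getD ch (-1)
    if b = -1 then -1 else altSum best rest (total + b)

def solution_alt (keymap : List String) (targets : List String) : List Int :=
  let best := altDict keymap targets
  targets.foldl (fun result t =>
    if t ≠ "" then result ++ [altSum best t.toList 0] else result) []

-- ===== PRECONDITION & SPEC =====
def Spec_solution (keymap : List String) (targets : List String) (out : List Int) : Prop := out = solution_alt keymap targets
instance (keymap : List String) (targets : List String) (out : List Int) : Decidable (Spec_solution keymap targets out) := by unfold Spec_solution; infer_instance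

-- ===== CLAIM (what is proved, stated in full; the proofs are below) =====
def Claim_equal_solution : Prop := ∀ (keymap : List String) (targets : List String), Dom_solution keymap targets → Spec_solution keymap targets (solution keymap targets)

-- ===== LEMMAS AND PROOFS =====

-- one keymap string: A's append-to-sub step and B's running-min step stay in sync
theorem inv_step (f : Int) (hp : f = -1 ∨ 0 ≤ f) (sub : List Int) (m : Int)
    (h1 : m = -1 ↔ sub = []) (h2 : ∀ v ∈ sub, 1 ≤ v)
    (h3 : sub ≠ [] → PySem.List.min? sub (fun v => v) = some m) :
    ((if f ≠ -1 ∧ (m = -1 ∨ f + 1 < m) then f + 1 else m) = -1 ↔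
        (if f = -1 then sub else sub ++ [f + 1]) = []) ∧
    (∀ v ∈ (if f = -1 then sub else sub ++ [f + 1]), 1 ≤ v) ∧
    ((if f = -1 then sub else sub ++ [f + 1]) ≠ [] →
      PySem.List.min? (if f = -1 then sub else sub ++ [f + 1]) (fun v => v)
        = some (if f ≠ -1 ∧ (m = -1 ∨ f + 1 < m) then f + 1 else m)) := by
  by_cases hf : f = -1
  · simp only [hf, if_pos, ne_eq, not_true_eq_false, false_and, if_false]
    simpa using ⟨h1, h2, h3⟩
  · have hpos : 0 ≤ f := hp.resolve_left hf
    have e2 : (if f ≠ -1 ∧ (m = -1 ∨ f + 1 < m) then f + 1 else m)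
        = (if m = -1 ∨ f + 1 < m then f + 1 else m) := by
      by_cases h : m = -1 ∨ f + 1 < m
      · rw [if_pos ⟨hf, h⟩, if_pos h]
      · rw [if_neg (fun hh => h hh.2), if_neg h]
    rw [if_neg hf, e2]
    rcases sub with _ | ⟨x, t⟩
    · have hm : m = -1 := h1.2 rfl
      rw [if_pos (Or.inl hm), List.nil_append]
      refine ⟨by constructor <;> intro h <;> [omega; simp at h], ?_, ?_⟩
      · intro v hv; simp at hv; omega
      · intro _
        rw [PySem.List.min?_id_cons]
        simp
    · have hm : m ≠ -1 := fun h => by simpa using h1.1 h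
      have hmin : PySem.List.min? (x :: t) (fun v => v) = some m := h3 (by simp)
      have hfold : t.foldl min x = m := by
        rw [PySem.List.min?_id_cons] at hmin; exact Option.some_injective _ hmin
      have hm1 : 1 ≤ m := h2 m (PySem.List.min?_mem hmin)
      have e3 : (if m = -1 ∨ f + 1 < m then f + 1 else m)
          = (if f + 1 < m then f + 1 else m) := by
        by_cases h : f + 1 < m
        · rw [if_pos (Or.inr h), if_pos h]
        · rw [if_neg (by rintro (hh | hh); exacts [hm hh, h hh]), if_neg h]
      rw [e3]
      have hmin' : PySem.List.min? ((x :: t) ++ [f + 1]) (fun v => v)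
          = some (min m (f + 1)) := by
        rw [List.cons_append, PySem.List.min?_id_cons, List.foldl_append, hfold]
        simp
      refine ⟨?_, ?_, ?_⟩
      · constructor
        · intro h; split_ifs at h <;> omega
        · intro h; simp at h
      · intro v hv
        rcases List.mem_append.1 hv with h | h
        · exact h2 v h
        · simp at h; omega
      · intro _
        rw [hmin']
        congr 1
        by_cases h : m ≤ f + 1
        · rw [min_eq_left h, if_neg (by omega)]
        · rw [min_eq_right (by omega), if_pos (by omega)]

-- A's per-character 'sub' list and B's running min describe the same quantity
theorem sub_best_inv (c : Char) : ∀ (l : List String) (sub : List Int) (m : Int),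
    (m = -1 ↔ sub = []) → (∀ v ∈ sub, 1 ≤ v) →
    (sub ≠ [] → PySem.List.min? sub (fun v => v) = some m) →
    (let sub' := l.foldl (fun sub z =>
        let f := PySem.Str.find z (String.mk [c])
        if f = -1 then sub else sub ++ [f + 1]) sub
     let m' := l.foldl (fun m z =>
        let f := PySem.Str.find z (String.mk [c])
        if f ≠ -1 ∧ (m = -1 ∨ f + 1 < m) then f + 1 else m) m
     (m' = -1 ↔ sub' = []) ∧ (∀ v ∈ sub', 1 ≤ v) ∧
       (sub' ≠ [] → PySem.List.min? sub' (fun v => v) = some m')) := by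
  intro l
  induction l with
  | nil => intro sub m h1 h2 h3; exact ⟨h1, h2, h3⟩
  | cons z l ih =>
    intro sub m h1 h2 h3
    have hp : PySem.Str.find z (String.mk [c]) = -1 ∨ 0 ≤ PySem.Str.find z (String.mk [c]) := by
      by_cases hf : PySem.Str.find z (String.mk [c]) = -1
      · exact Or.inl hf
      · exact Or.inr ((PySem.Str.find_nonneg_iff z (String.mk [c])).2
          ((PySem.Str.find_ne_neg_one_iff z (String.mk [c])).1 hf))
    obtain ⟨g1, g2, g3⟩ := inv_step (PySem.Str.find z (String.mk [c])) hp sub m h1 h2 h3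
    simpa only [List.foldl_cons] using ih _ _ g1 g2 g3

theorem sub_best (keymap : List String) (c : Char) :
    (altBest keymap c = -1 ↔ solSub keymap c = []) ∧
    (∀ v ∈ solSub keymap c, 1 ≤ v) ∧
    (solSub keymap c ≠ [] →
      PySem.List.min? (solSub keymap c) (fun v => v) = some (altBest keymap c)) := by
  have h := sub_best_inv c keymap [] (-1) (by simp) (by simp) (by simp)
  exact ⟨⟨fun hm => h.1.1 hm, fun hs => h.1.2 hs⟩, h.2.1, h.2.2⟩

-- the dict-building double loop: stored values are always altBest, and every seen char is stored
theorem dict_fold_chars (keymap : List String) (cs : List Char) :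
    ∀ (d : PySem.Dict Char Int),
      (∀ c v, d.get? c = some v → v = altBest keymap c) →
      ((∀ c v, (cs.foldl (fun d ch =>
          if d.contains ch then d else d.insert ch (altBest keymap ch)) d).get? c = some v →
          v = altBest keymap c) ∧
       (∀ c, c ∈ cs ∨ (d.get? c).isSome →
          ((cs.foldl (fun d ch =>
            if d.contains ch then d else d.insert ch (altBest keymap ch)) d).get? c).isSome)) := by
  induction cs with
  | nil =>
    intro d hinv
    refine ⟨hinv, ?_⟩
    intro c hc
    rcases hc with hc | hc
    · simp at hc
    · exact hc
  | cons c0 cs ih =>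
    intro d hinv
    simp only [List.foldl_cons]
    have hinv' : ∀ c v, (if d.contains c0 then d
        else d.insert c0 (altBest keymap c0)).get? c = some v → v = altBest keymap c := by
      intro c v hv
      by_cases hcn : d.contains c0
      · rw [if_pos hcn] at hv; exact hinv c v hv
      · rw [if_neg hcn, PySem.Dict.get?_insert] at hv
        by_cases hce : c = c0
        · rw [if_pos hce] at hv; subst hce; exact (Option.some_injective _ hv).symm
        · rw [if_neg hce] at hv; exact hinv c v hv
    refine ⟨(ih _ hinv').1, ?_⟩
    intro c hc
    apply (ih _ hinv').2
    rcases hc with hc | hc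
    · rcases List.mem_cons.1 hc with hce | hcs
      · right
        by_cases hcn : d.contains c0
        · rw [if_pos hcn, hce, ← PySem.Dict.contains_eq_isSome_get?]; exact hcn
        · rw [if_neg hcn, hce, PySem.Dict.get?_insert_self]; simp
      · exact Or.inl hcs
    · right
      by_cases hcn : d.contains c0
      · rw [if_pos hcn]; exact hc
      · rw [if_neg hcn, PySem.Dict.get?_insert]
        by_cases hce : c = c0
        · rw [if_pos hce]; simp
        · rw [if_neg hce]; exact hc

theorem dict_fold_spec (keymap : List String) (ts : List String) :
    ∀ (d : PySem.Dict Char Int),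
      (∀ c v, d.get? c = some v → v = altBest keymap c) →
      ((∀ c v, (ts.foldl (fun d t => t.toList.foldl (fun d ch =>
          if d.contains ch then d else d.insert ch (altBest keymap ch)) d) d).get? c = some v →
          v = altBest keymap c) ∧
       (∀ c, c ∈ ts.flatMap String.toList ∨ (d.get? c).isSome →
          ((ts.foldl (fun d t => t.toList.foldl (fun d ch =>
            if d.contains ch then d else d.insert ch (altBest keymap ch)) d) d).get? c).isSome)) := by
  induction ts with
  | nil =>
    intro d hinv
    refine ⟨hinv, ?_⟩
    intro c hc
    rcases hc with hc | hc
    · simp at hc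
    · exact hc
  | cons t ts ih =>
    intro d hinv
    simp only [List.foldl_cons]
    obtain ⟨g1, g2⟩ := dict_fold_chars keymap t.toList d hinv
    refine ⟨(ih _ g1).1, ?_⟩
    intro c hc
    apply (ih _ g1).2
    rcases hc with hc | hc
    · rcases List.mem_flatMap.1 hc with ⟨u, hu, hcu⟩
      rcases List.mem_cons.1 hu with he | hm
      · exact Or.inr (g2 c (Or.inl (he ▸ hcu)))
      · exact Or.inl (List.mem_flatMap.2 ⟨u, hm, hcu⟩)
    · exact Or.inr (g2 c (Or.inr hc))

-- the memo dict: every target character is mapped to altBest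
theorem dict_get (keymap : List String) (targets : List String) :
    ∀ t ∈ targets, ∀ c ∈ t.toList,
      (altDict keymap targets).get? c = some (altBest keymap c) := by
  intro t ht c hc
  obtain ⟨g1, g2⟩ := dict_fold_spec keymap targets PySem.Dict.empty (by simp)
  have hs := g2 c (Or.inl (List.mem_flatMap.2 ⟨t, ht, hc⟩))
  rcases Option.isSome_iff_exists.1 hs with ⟨v, hv⟩
  rw [show (altDict keymap targets).get? c = some v from hv]
  exact congrArg some (g1 c v hv)

-- B's per-target loop computes A's per-target loop's result (and A's count grows strictly)
theorem inner_eq (keymap : List String) (best : PySem.Dict Char Int) :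
    ∀ (cs : List Char) (total : Int),
      (∀ c ∈ cs, best.get? c = some (altBest keymap c)) →
      (altSum best cs total =
        (if (solInner keymap cs total).1 then -1 else (solInner keymap cs total).2)) ∧
      total ≤ (solInner keymap cs total).2 ∧
      ((solInner keymap cs total).1 = false → cs ≠ [] →
        total < (solInner keymap cs total).2) := by
  intro cs
  induction cs with
  | nil =>
    intro total _
    refine ⟨by simp [solInner, altSum], le_refl _, by simp⟩
  | cons c rest ih =>
    intro total hb
    obtain ⟨s1, s2, s3⟩ := sub_best keymap c
    have hget : best.getD c (-1) = altBest keymap c := by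
      rw [PySem.Dict.getD_eq_get?_getD, hb c (by simp)]; rfl
    by_cases hemp : solSub keymap c = []
    · have hm : altBest keymap c = -1 := s1.2 hemp
      have hA : solInner keymap (c :: rest) total = (true, total) := by
        simp [solInner, hemp]
      have hB : altSum best (c :: rest) total = -1 := by
        simp [altSum, hget, hm]
      refine ⟨by rw [hA, hB]; simp, by rw [hA], by rw [hA]; simp⟩
    · have hm : altBest keymap c ≠ -1 := fun h => hemp (s1.1 h)
      have hmin : PySem.List.min? (solSub keymap c) (fun v => v)
          = some (altBest keymap c) := s3 hemp
      have hb1 : 1 ≤ altBest keymap c := s2 _ (PySem.List.min?_mem hmin)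
      have hA : solInner keymap (c :: rest) total
          = solInner keymap rest (total + altBest keymap c) := by
        simp [solInner, hemp, hmin]
      have hB : altSum best (c :: rest) total
          = altSum best rest (total + altBest keymap c) := by
        simp [altSum, hget, hm]
      obtain ⟨i1, i2, i3⟩ := ih (total + altBest keymap c) (fun x hx => hb x (by simp [hx]))
      refine ⟨by rw [hA, hB, i1], by rw [hA]; omega, ?_⟩
      intro hbr _
      rw [hA] at hbr ⊢
      have := i2
      omega

-- what A appends for one target
def emitA (keymap : List String) (x : String) : List Int :=
  let r := solInner keymap x.toList 0
  if r.1 then [-1] else if r.2 ≠ 0 then [r.2] else []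

theorem solution_eq_flatMap (keymap : List String) (targets : List String) :
    solution keymap targets = targets.flatMap (emitA keymap) := by
  suffices h : ∀ (ts : List String) (acc : List Int),
      ts.foldl (fun result x =>
        let r := solInner keymap x.toList 0
        if r.1 then result ++ [-1]
        else if r.2 ≠ 0 then result ++ [r.2]
        else result) acc = acc ++ ts.flatMap (emitA keymap) by
    unfold solution
    rw [h targets []]
    simp
  intro ts
  induction ts with
  | nil => intro acc; simp
  | cons t ts ih =>
    intro acc
    simp only [List.foldl_cons, List.flatMap_cons]
    rw [ih]
    by_cases h1 : (solInner keymap t.toList 0).1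
    · simp [emitA, h1]
    · by_cases h2 : (solInner keymap t.toList 0).2 ≠ 0
      · simp [emitA, h1, h2]
      · simp [emitA, h1, h2]

-- what B appends for one target
def emitB (keymap : List String) (targets : List String) (t : String) : List Int :=
  if t ≠ "" then [altSum (altDict keymap targets) t.toList 0] else []

theorem alt_eq_flatMap (keymap : List String) (targets : List String) :
    solution_alt keymap targets = targets.flatMap (emitB keymap targets) := by
  suffices h : ∀ (ts : List String) (acc : List Int),
      ts.foldl (fun result t =>
        if t ≠ "" then result ++ [altSum (altDict keymap targets) t.toList 0]
        else result) acc = acc ++ ts.flatMap (emitB keymap targets) by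
    unfold solution_alt
    rw [h targets []]
    simp
  intro ts
  induction ts with
  | nil => intro acc; simp
  | cons t ts ih =>
    intro acc
    simp only [List.foldl_cons, List.flatMap_cons]
    rw [ih]
    by_cases h1 : t ≠ ""
    · simp [emitB, h1]
    · simp [emitB, h1]

theorem toList_ne_nil {s : String} (h : s ≠ "") : s.toList ≠ [] := by
  intro hc
  exact h (String.toList_inj.mp (by simpa using hc))

theorem emitA_singleton (keymap : List String) (targets : List String)
    (t : String) (ht : t ∈ targets) (hne : t ≠ "") :
    emitA keymap t = [altSum (altDict keymap targets) t.toList 0] := by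
  obtain ⟨e1, e2, e3⟩ := inner_eq keymap (altDict keymap targets) t.toList 0
    (dict_get keymap targets t ht)
  unfold emitA
  by_cases h1 : (solInner keymap t.toList 0).1
  · rw [if_pos h1, e1, if_pos h1]
  · have hlt : 0 < (solInner keymap t.toList 0).2 :=
      e3 (by simpa using h1) (toList_ne_nil hne)
    rw [if_neg h1, if_pos (by omega), e1, if_neg h1]

theorem emitA_nil (keymap : List String) : emitA keymap "" = [] := by
  simp [emitA, solInner]

-- ===== VERDICT (by name: the statement is the Claim_ definition above) =====
theorem solution_spec : Claim_equal_solution := by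
  intro keymap targets _
  unfold Spec_solution
  rw [solution_eq_flatMap, alt_eq_flatMap]
  have aux : ∀ l : List String, (∀ t ∈ l, t ∈ targets) →
      l.flatMap (emitA keymap) = l.flatMap (emitB keymap targets) := by
    intro l
    induction l with
    | nil => intro _; simp
    | cons t l ih =>
      intro hsub
      rw [List.flatMap_cons, List.flatMap_cons, ih (fun u hu => hsub u (by simp [hu]))]
      by_cases ht : t = ""
      · rw [ht, emitA_nil]
        simp [emitB]
      · rw [emitA_singleton keymap targets t (hsub t (by simp)) ht]
        simp [emitB, ht]
  exact aux targets (fun _ h => h)
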